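-- pv_equiv track=rewrite | github.com/baodoan25/etsytool | etsytool/data_engine/storage.py | gop_listing
-- ===== SOURCE A (Python) =====
-- def gop_listing (existing_listings ,listing_moi ):
--     da_gop ={}
--
--     for listing in [*existing_listings ,*listing_moi ]:
--         ma_listing =str (listing .get ("listingId")or "").strip ()
--         url_listing =str (listing .get ("listingUrl")or "").strip ()
--         khoa =ma_listing or url_listing
--
--         if not khoa :
--             continue
--
--         da_gop [khoa ]=listing
--
--     return list (da_gop .values ())
-- ===== SOURCE B (Python) =====
-- def _key(listing):
--     ma = str(listing.get("listingId") or "").strip()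
--     url = str(listing.get("listingUrl") or "").strip()
--     return ma or url
--
--
-- def gop_listing(existing_listings, listing_moi):
--     combined = [*existing_listings, *listing_moi]
--     # pass 1: last listing per non-empty key
--     last = {}
--     for listing in combined:
--         khoa = _key(listing)
--         if khoa:
--             last[khoa] = listing
--     # pass 2: emit each key's last listing at its first occurrence
--     out = []
--     seen = set()
--     for listing in combined:
--         khoa = _key(listing)
--         if khoa and khoa not in seen:
--             seen.add(khoa)
--             out.append(last[khoa])
--     return out
-- ===== Notes on version B (the rewrite author's own statement) =====
-- stated objective: alternative
-- what changed: A builds one dict while iterating and returns its values; B separates the two concerns into two explicit passes over the concatenated list: a first pass recording each non-empty key's last listing in a table, and a second pass with a seen-set that appends the table's stored value at each key's first occurrence, producing the result list directly instead of reading it off the dict's insertion order.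
import Mathlib
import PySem

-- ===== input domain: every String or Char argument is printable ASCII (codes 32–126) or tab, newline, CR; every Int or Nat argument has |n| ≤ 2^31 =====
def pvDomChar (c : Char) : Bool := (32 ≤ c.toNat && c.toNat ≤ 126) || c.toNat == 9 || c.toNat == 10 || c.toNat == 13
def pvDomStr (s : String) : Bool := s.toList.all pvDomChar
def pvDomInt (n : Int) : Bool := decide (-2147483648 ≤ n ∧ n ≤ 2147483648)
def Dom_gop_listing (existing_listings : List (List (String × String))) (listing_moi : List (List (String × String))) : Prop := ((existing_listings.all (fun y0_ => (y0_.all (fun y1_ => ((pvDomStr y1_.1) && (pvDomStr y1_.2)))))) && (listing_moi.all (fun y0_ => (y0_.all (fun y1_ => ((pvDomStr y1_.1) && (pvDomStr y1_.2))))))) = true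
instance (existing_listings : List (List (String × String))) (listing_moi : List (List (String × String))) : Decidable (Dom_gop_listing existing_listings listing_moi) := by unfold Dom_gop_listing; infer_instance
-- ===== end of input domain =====

-- B replaces A's "one dict built on the fly, return its values" with two explicit passes
-- (a last-value table, then an ordered emit pass with a seen-set); alternative decomposition, same cost.


-- ===== PORT A =====
-- shared key computation: str(listing.get("listingId") or "").strip() etc.; 'x or ""' on an
-- Option String is exactly getD "" (None → "", "" → ""), and 'ma or url' is the if below.
def pvKhoa (listing : List (String × String)) : String :=
  let ma := PySem.Str.strip (((PySem.Dict.mk listing).get? "listingId").getD "")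
  let url := PySem.Str.strip (((PySem.Dict.mk listing).get? "listingUrl").getD "")
  if ma = "" then url else ma

def gop_listing (existing_listings : List (List (String × String))) (listing_moi : List (List (String × String))) : List (List (String × String)) :=
  ((existing_listings ++ listing_moi).foldl
    (fun da_gop listing =>
      let khoa := pvKhoa listing
      if khoa = "" then da_gop else da_gop.insert khoa listing)
    PySem.Dict.empty).values

-- ===== PORT B =====
def gop_listing_alt (existing_listings : List (List (String × String))) (listing_moi : List (List (String × String))) : List (List (String × String)) :=
  let combined := existing_listings ++ listing_moi
  -- pass 1: last listing per non-empty key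
  let last := combined.foldl
    (fun d listing =>
      let khoa := pvKhoa listing
      if khoa = "" then d else d.insert khoa listing)
    PySem.Dict.empty
  -- pass 2: emit each key's last listing at its first occurrence
  -- (last[khoa] ported as getD: the key is always present when looked up)
  (combined.foldl
    (fun st listing =>
      let khoa := pvKhoa listing
      if khoa = "" then st
      else if PySem.Set.contains st.1 khoa then st
      else (PySem.Set.add st.1 khoa, st.2 ++ [last.getD khoa []]))
    (PySem.Set.empty, ([] : List (List (String × String))))).2

-- ===== PRECONDITION & SPEC =====
def Spec_gop_listing (existing_listings : List (List (String × String))) (listing_moi : List (List (String × String))) (out : List (List (String × String))) : Prop := out = gop_listing_alt existing_listings listing_moi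
instance (existing_listings : List (List (String × String))) (listing_moi : List (List (String × String))) (out : List (List (String × String))) : Decidable (Spec_gop_listing existing_listings listing_moi out) := by unfold Spec_gop_listing; infer_instance

-- ===== CLAIM (what is proved, stated in full; the proofs are below) =====
def Claim_equal_gop_listing : Prop := ∀ (existing_listings : List (List (String × String))) (listing_moi : List (List (String × String))), Dom_gop_listing existing_listings listing_moi → Spec_gop_listing existing_listings listing_moi (gop_listing existing_listings listing_moi)

-- ===== LEMMAS AND PROOFS =====

theorem pv_update_cons (s : List String) (x : String) (l : List String) :
    PySem.Set.update s (x :: l) = PySem.Set.update (PySem.Set.add s x) l := rfl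

-- Set.update only appends: the old set is a prefix of the updated one.
theorem pv_update_prefix (l : List String) : ∀ (s : List String),
    ∃ t, PySem.Set.update s l = s ++ t := by
  induction l with
  | nil => intro s; exact ⟨[], by simp [PySem.Set.update]⟩
  | cons x l ih =>
    intro s
    obtain ⟨t, ht⟩ := ih (PySem.Set.add s x)
    by_cases hx : x ∈ s
    · have hadd : PySem.Set.add s x = s := by simp [PySem.Set.add, hx]
      rw [hadd] at ht
      exact ⟨t, by rw [pv_update_cons, hadd]; exact ht⟩
    · have hadd : PySem.Set.add s x = s ++ [x] := by simp [PySem.Set.add, hx]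
      rw [hadd] at ht
      exact ⟨x :: t, by rw [pv_update_cons, hadd, ht]; simp⟩

-- invariant of B's second pass, for an arbitrary table T
theorem pv_pass2 (T : PySem.Dict String (List (String × String))) :
    ∀ (l : List (List (String × String))) (seen : List String) (acc : List (List (String × String))),
    (l.foldl
      (fun st listing =>
        if pvKhoa listing = "" then st
        else if PySem.Set.contains st.1 (pvKhoa listing) then st
        else (PySem.Set.add st.1 (pvKhoa listing), st.2 ++ [T.getD (pvKhoa listing) []]))
      (seen, acc)).2
    = acc ++ ((PySem.Set.update seen
        ((l.filter (fun x => decide (¬ pvKhoa x = ""))).map pvKhoa)).drop seen.length).map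
        (fun k => T.getD k []) := by
  intro l
  induction l with
  | nil => intro seen acc; simp [PySem.Set.update, List.drop_length]
  | cons x l ih =>
    intro seen acc
    rw [List.foldl_cons]
    by_cases hk : pvKhoa x = ""
    · rw [List.filter_cons_of_neg (by simp [hk])]
      simpa [hk] using ih seen acc
    · rw [List.filter_cons_of_pos (by simp [hk]), List.map_cons, pv_update_cons]
      by_cases hmem : pvKhoa x ∈ seen
      · have hadd : PySem.Set.add seen (pvKhoa x) = seen := by simp [PySem.Set.add, hmem]
        rw [hadd]
        simpa [hk, hmem] using ih seen acc
      · have hadd : PySem.Set.add seen (pvKhoa x) = seen ++ [pvKhoa x] := by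
          simp [PySem.Set.add, hmem]
        rw [hadd]
        obtain ⟨t, ht⟩ := pv_update_prefix
          ((l.filter (fun x => decide (¬ pvKhoa x = ""))).map pvKhoa) (seen ++ [pvKhoa x])
        rw [ht]
        have h2 : ((seen ++ [pvKhoa x]) ++ t).drop seen.length = [pvKhoa x] ++ t := by
          rw [List.append_assoc]
          exact List.drop_left
        rw [h2]
        have lhs := ih (seen ++ [pvKhoa x]) (acc ++ [T.getD (pvKhoa x) []])
        rw [ht] at lhs
        have h1 : ((seen ++ [pvKhoa x]) ++ t).drop (seen ++ [pvKhoa x]).length = t :=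
          List.drop_left
        rw [h1] at lhs
        simpa [hk, hmem, hadd] using lhs

-- the shared first fold, rewritten as a filter-then-insert fold
theorem pv_fold_filter (l : List (List (String × String))) :
    l.foldl
      (fun d listing =>
        if pvKhoa listing = "" then d else d.insert (pvKhoa listing) listing)
      PySem.Dict.empty
    = (l.filter (fun x => decide (¬ pvKhoa x = ""))).foldl
        (fun d listing => d.insert (pvKhoa listing) listing) PySem.Dict.empty := by
  have : (fun (d : PySem.Dict String (List (String × String))) listing =>
      if pvKhoa listing = "" then d else d.insert (pvKhoa listing) listing)
    = (fun d listing => if ¬ pvKhoa listing = "" then d.insert (pvKhoa listing) listing else d) := by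
    funext d listing
    by_cases h : pvKhoa listing = "" <;> simp [h]
  rw [this, PySem.List.foldl_ite_eq_foldl_filter]

-- ===== VERDICT (by name: the statement is the Claim_ definition above) =====
theorem gop_listing_spec : Claim_equal_gop_listing := by
  intro ex mo _
  unfold Spec_gop_listing
  simp only [gop_listing, gop_listing_alt]
  set L := ex ++ mo with hL
  set F := L.filter (fun x => decide (¬ pvKhoa x = "")) with hF
  set T := F.foldl (fun d listing => d.insert (pvKhoa listing) listing)
      (PySem.Dict.empty : PySem.Dict String (List (String × String))) with hT
  have hfold := pv_fold_filter L
  rw [hfold]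
  have hnd : T.keys.Nodup := by
    rw [hT]
    exact PySem.Dict.nodup_keys_foldl_insert_key F pvKhoa _ _ (by simp [PySem.Dict.keys_empty])
  have hkeys : T.keys = PySem.Set.update (PySem.Dict.empty : PySem.Dict String (List (String × String))).keys (F.map pvKhoa) := by
    rw [hT]
    exact PySem.Dict.keys_foldl_insert_key F pvKhoa _ _
  have hvals : T.values = T.keys.map (fun k => T.getD k []) :=
    PySem.Dict.values_eq_map_keys T hnd []
  rw [hvals, hkeys]
  rw [← hF, ← hT]
  simp only [PySem.Set.empty]
  rw [pv_pass2 T L [] []]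
  simp [hF]
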